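-- pv_equiv track=rewrite | github.com/Jonggae/Algorithm_Practice | 백준/Silver/11561. 징검다리/징검다리.py | max_steps
-- ===== SOURCE A (Python) =====
-- def max_steps(n):
--     left, right = 1, n
--     answer = 0
--
--     while left<=right:
--         mid = (left+right)//2
--         sum_mid = mid * (mid+1) //2
--
--         if sum_mid <= n:
--             answer = mid
--             left = mid +1
--         else:
--             right = mid-1
--
--     return answer
-- ===== SOURCE B (Python) =====
-- import math
--
-- def max_steps(n):
--     if n < 0:
--         return 0
--     s = math.isqrt(8 * n + 1)
--     return (s - 1) // 2
-- ===== Notes on version B (the rewrite author's own statement) =====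
-- stated objective: idiomatic
-- what changed: Replaced the binary search loop by the exact integer closed form floor((isqrt(8n+1)-1)/2), guarding negative n where the loop body never runs.
import Mathlib
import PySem

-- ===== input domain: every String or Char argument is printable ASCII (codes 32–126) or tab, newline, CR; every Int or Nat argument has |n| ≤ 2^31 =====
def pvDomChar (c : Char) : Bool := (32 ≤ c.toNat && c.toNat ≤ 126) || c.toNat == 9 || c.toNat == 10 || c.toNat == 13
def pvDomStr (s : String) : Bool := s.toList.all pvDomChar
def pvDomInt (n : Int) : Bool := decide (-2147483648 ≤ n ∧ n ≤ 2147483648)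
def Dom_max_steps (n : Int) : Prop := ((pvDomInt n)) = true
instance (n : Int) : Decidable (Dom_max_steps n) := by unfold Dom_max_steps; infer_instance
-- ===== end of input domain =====

-- B replaces A's binary search by the exact integer closed form ⌊(isqrt(8n+1)-1)/2⌋, guarding negative n; objective: idiomatic.

-- ===== PORT A =====
-- the while loop of A, state (left, right, answer)
def msLoop (n left right answer : Int) : Int :=
  if left ≤ right then
    let mid := PySem.Int.floordiv (left + right) 2
    let sum_mid := PySem.Int.floordiv (mid * (mid + 1)) 2
    if sum_mid ≤ n then msLoop n (mid + 1) right mid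
    else msLoop n left (mid - 1) answer
  else answer
termination_by (right + 1 - left).toNat
decreasing_by
  · have h := PySem.Int.floordiv_two_mid_bounds (by assumption : left ≤ right)
    simp only [PySem.Int.floordiv_eq_ediv_of_pos (show (0:Int) < 2 by omega)] at h ⊢
    omega
  · have h := PySem.Int.floordiv_two_mid_bounds (by assumption : left ≤ right)
    simp only [PySem.Int.floordiv_eq_ediv_of_pos (show (0:Int) < 2 by omega)] at h ⊢
    omega

def max_steps (n : Int) : Int := msLoop n 1 n 0

-- ===== PORT B =====
-- math.isqrt on a nonnegative int is exactly Nat.sqrt (both compute ⌊√·⌋ exactly)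
def max_steps_alt (n : Int) : Int :=
  if n < 0 then 0
  else
    let s : Int := Int.ofNat (Nat.sqrt (8 * n + 1).toNat)
    PySem.Int.floordiv (s - 1) 2

-- ===== PRECONDITION & SPEC =====
def Spec_max_steps (n : Int) (out : Int) : Prop := out = max_steps_alt n
instance (n : Int) (out : Int) : Decidable (Spec_max_steps n out) := by unfold Spec_max_steps; infer_instance

-- ===== CLAIM (what is proved, stated in full; the proofs are below) =====
def Claim_equal_max_steps : Prop := ∀ (n : Int), Dom_max_steps n → Spec_max_steps n (max_steps n)

-- ===== LEMMAS AND PROOFS =====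

-- characterization: r is THE answer for n iff 0 ≤ r, r(r+1) ≤ 2n < (r+1)(r+2)
def msP (n r : Int) : Prop := 0 ≤ r ∧ r * (r + 1) ≤ 2 * n ∧ 2 * n < (r + 1) * (r + 2)

theorem msP_unique {n r r' : Int} (h : msP n r) (h' : msP n r') : r = r' := by
  obtain ⟨hr0, hr1, hr2⟩ := h
  obtain ⟨hs0, hs1, hs2⟩ := h'
  by_contra hne
  rcases lt_or_gt_of_ne hne with hlt | hlt
  · nlinarith
  · nlinarith

-- unfolding equation usable in proofs
theorem msLoop_eq (n left right answer : Int) :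
    msLoop n left right answer =
      if left ≤ right then
        let mid := PySem.Int.floordiv (left + right) 2
        let sum_mid := PySem.Int.floordiv (mid * (mid + 1)) 2
        if sum_mid ≤ n then msLoop n (mid + 1) right mid
        else msLoop n left (mid - 1) answer
      else answer := by
  rw [msLoop]

theorem msLoop_correct (n : Int) :
    ∀ (fuel : Nat) (left right answer : Int),
      (right + 1 - left).toNat ≤ fuel →
      left = answer + 1 → 0 ≤ answer →
      answer * (answer + 1) ≤ 2 * n →
      (∀ m, right < m → 2 * n < m * (m + 1)) →
      msP n (msLoop n left right answer) := by
  intro fuel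
  induction fuel with
  | zero =>
    intro left right answer hf hl h0 ha hr
    rw [msLoop_eq]
    have hlr : ¬ left ≤ right := by omega
    simp only [hlr, if_false]
    refine ⟨h0, ha, ?_⟩
    have := hr (answer + 1) (by omega)
    nlinarith
  | succ k ih =>
    intro left right answer hf hl h0 ha hr
    rw [msLoop_eq]
    by_cases hlr : left ≤ right
    · simp only [hlr, if_true]
      have hmid := PySem.Int.floordiv_two_mid_bounds hlr
      set mid := PySem.Int.floordiv (left + right) 2 with hmiddef
      have hev : (mid * (mid + 1)) % 2 = 0 := Int.even_iff.mp (Int.even_mul_succ_self mid)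
      have hsum : PySem.Int.floordiv (mid * (mid + 1)) 2 ≤ n ↔ mid * (mid + 1) ≤ 2 * n := by
        rw [PySem.Int.floordiv_eq_ediv_of_pos (show (0:Int) < 2 by omega)]
        omega
      by_cases hc : PySem.Int.floordiv (mid * (mid + 1)) 2 ≤ n
      · simp only [hc, if_true]
        exact ih (mid + 1) right mid (by omega) rfl (by omega) (hsum.mp hc) hr
      · simp only [hc, if_false]
        refine ih left (mid - 1) answer (by omega) hl h0 ha ?_
        intro m hm
        have hmn : ¬ mid * (mid + 1) ≤ 2 * n := fun h => hc (hsum.mpr h)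
        push Not at hmn
        by_cases hmm : mid ≤ m
        · nlinarith
        · exact hr m (by omega)
    · simp only [hlr, if_false]
      refine ⟨h0, ha, ?_⟩
      have := hr (answer + 1) (by omega)
      nlinarith

theorem max_steps_char (n : Int) (hn : 0 ≤ n) : msP n (max_steps n) := by
  unfold max_steps
  refine msLoop_correct n (n + 1 - 1).toNat 1 n 0 (by omega) rfl le_rfl (by omega) ?_
  intro m hm
  nlinarith

theorem alt_char (n : Int) (hn : 0 ≤ n) : msP n (max_steps_alt n) := by
  have hnlt : ¬ n < 0 := not_lt.mpr hn
  have halt : max_steps_alt n = (((Nat.sqrt (8 * n + 1).toNat : Nat) : Int) - 1) / 2 := by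
    simp only [max_steps_alt, if_neg hnlt, Int.ofNat_eq_natCast,
      PySem.Int.floordiv_eq_ediv_of_pos (show (0:Int) < 2 by omega)]
  rw [halt]
  set N : Nat := (8 * n + 1).toNat with hN
  set k : Nat := Nat.sqrt N with hk
  have hNn : (N : Int) = 8 * n + 1 := by omega
  have hk1 : 1 ≤ k := by rw [hk]; exact Nat.sqrt_pos.mpr (by omega)
  have hlowN : k * k ≤ N := by simpa [hk, pow_two] using Nat.sqrt_le' N
  have hhighN : N < (k + 1) * (k + 1) := by simpa [hk, pow_two] using Nat.lt_succ_sqrt' N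
  have hlow : (k : Int) * (k : Int) ≤ 8 * n + 1 := by zify at hlowN; omega
  have hhigh : 8 * n + 1 < ((k : Int) + 1) * ((k : Int) + 1) := by zify at hhighN; omega
  set q : Int := ((k : Int) - 1) / 2 with hq
  have hk1' : (1 : Int) ≤ (k : Int) := by exact_mod_cast hk1
  have hq1 : 2 * q + 1 ≤ (k : Int) := by omega
  have hq2 : (k : Int) ≤ 2 * q + 2 := by omega
  have hq0 : 0 ≤ q := by omega
  refine ⟨hq0, by nlinarith, by nlinarith⟩

-- ===== VERDICT (by name: the statement is the Claim_ definition above) =====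
theorem max_steps_spec : Claim_equal_max_steps := by
  intro n _
  unfold Spec_max_steps
  by_cases hn : 0 ≤ n
  · exact msP_unique (max_steps_char n hn) (alt_char n hn)
  · push Not at hn
    unfold max_steps max_steps_alt
    rw [msLoop_eq, if_neg (show ¬ (1 : Int) ≤ n by omega), if_pos hn]
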